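-- pv_equiv track=rewrite | github.com/iamonur/the_legendary_pipeline | src/caPolisher.py | reset_map
-- ===== SOURCE A (Python) =====
-- def reset_map(map):
--     for lnum, line in enumerate(map):
--         for chnum, ch in enumerate(line):
--             if ch != '1' and ch != '0':
--                 temp = list(line)
--                 temp[chnum] = '0'
--                 line = "".join(temp)
--                 map[lnum] = line
--
--     return map
-- ===== SOURCE B (Python) =====
-- import re
--
-- _NONBIN = re.compile(r'[^01]')
--
-- def reset_map(map):
--     # Replace every non-'0'/'1' character of each line by '0' with one regex
--     # substitution per line, instead of the char-by-char rebuild; mutate in place.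
--     map[:] = [_NONBIN.sub('0', line) for line in map]
--     return map
-- ===== Notes on version B (the rewrite author's own statement) =====
-- stated objective: idiomatic
-- what changed: The nested char loop that rebuilds the line via list(line)/join and reassigns map[lnum] on every non-binary char is replaced by one regex substitution [^01]->'0' per line in a single list comprehension assigned back with map[:] (same in-place mutation).
import Mathlib
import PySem

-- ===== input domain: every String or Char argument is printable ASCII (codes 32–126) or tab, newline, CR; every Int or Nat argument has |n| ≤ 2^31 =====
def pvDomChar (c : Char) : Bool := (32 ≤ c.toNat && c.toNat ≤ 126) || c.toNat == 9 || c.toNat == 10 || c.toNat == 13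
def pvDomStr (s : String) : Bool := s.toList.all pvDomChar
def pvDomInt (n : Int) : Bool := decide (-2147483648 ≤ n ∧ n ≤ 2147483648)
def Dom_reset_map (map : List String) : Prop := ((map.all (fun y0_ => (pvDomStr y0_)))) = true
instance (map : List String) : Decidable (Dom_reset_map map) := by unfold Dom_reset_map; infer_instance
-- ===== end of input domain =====

-- B replaces A's nested char loop and incremental list(line)/join rebuild by one
-- regex-style substitution ([^01] -> '0') per line; same in-place list mutation,
-- equivalence proved about the return value.

-- ===== PORT A =====
-- inner loop: for chnum, ch in enumerate(line): if ch != '1' and ch != '0': temp = list(line); temp[chnum] = '0'; line = ''.join(temp)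
def pvLineA (line : List Char) : List Char :=
  (PySem.List.enumerate line).foldl
    (fun cur p => if p.2 ≠ '1' ∧ p.2 ≠ '0' then cur.set p.1.toNat '0' else cur) line

-- outer loop: map[lnum] = line (the processed line; if no char changed this writes back the unchanged line, same value)
def reset_map (map : List String) : List String :=
  (PySem.List.enumerate map).foldl
    (fun m p => m.set p.1.toNat (String.ofList (pvLineA p.2.toList))) map

-- ===== PORT B =====
-- re.sub(r'[^01]', '0', line): every char not '0'/'1' becomes '0' (exact: per-char map)
def pvSubNonBin (line : List Char) : List Char :=
  line.map (fun c => if c = '0' ∨ c = '1' then c else '0')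

def reset_map_alt (map : List String) : List String :=
  map.map (fun line => String.ofList (pvSubNonBin line.toList))

-- ===== PRECONDITION & SPEC =====
def Spec_reset_map (map : List String) (out : List String) : Prop := out = reset_map_alt map
instance (map : List String) (out : List String) : Decidable (Spec_reset_map map out) := by unfold Spec_reset_map; infer_instance

-- ===== CLAIM (what is proved, stated in full; the proofs are below) =====
def Claim_equal_reset_map : Prop := ∀ (map : List String), Dom_reset_map map → Spec_reset_map map (reset_map map)

-- ===== LEMMAS AND PROOFS =====

-- folding a "set position p.1" step over an enumeration started at s+1 leaves the head alone
theorem pv_foldl_set_shift {α β : Type} (P : α → Prop) [DecidablePred P] (v : α → β) :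
    ∀ (l : List α) (s : Int), 0 ≤ s → ∀ (c : β) (cur : List β),
      (PySem.List.enumerate l (s+1)).foldl
          (fun m p => if P p.2 then m.set p.1.toNat (v p.2) else m) (c :: cur)
        = c :: (PySem.List.enumerate l s).foldl
          (fun m p => if P p.2 then m.set p.1.toNat (v p.2) else m) cur := by
  intro l
  induction l with
  | nil => intro s hs c cur; simp [PySem.List.enumerate_nil]
  | cons x l ih =>
    intro s hs c cur
    rw [PySem.List.enumerate_cons, PySem.List.enumerate_cons]
    simp only [List.foldl_cons]
    have htn : (s + 1).toNat = s.toNat + 1 := by omega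
    by_cases hP : P x
    · simp only [if_pos hP, htn, List.set_cons_succ]
      exact ih (s + 1) (by omega) c _
    · simp only [if_neg hP]
      exact ih (s + 1) (by omega) c cur

theorem pvLineA_eq (l : List Char) : pvLineA l = pvSubNonBin l := by
  induction l with
  | nil => simp [pvLineA, pvSubNonBin, PySem.List.enumerate_nil]
  | cons c l ih =>
    unfold pvLineA pvSubNonBin
    rw [PySem.List.enumerate_cons]
    simp only [List.foldl_cons, List.map_cons]
    have hstep : (if c ≠ '1' ∧ c ≠ '0' then (c :: l).set (0 : Int).toNat '0' else c :: l)
        = (if c = '0' ∨ c = '1' then c else '0') :: l := by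
      by_cases h0 : c = '0'
      · simp [h0]
      · by_cases h1 : c = '1' <;> simp [h0, h1]
    rw [hstep]
    have := pv_foldl_set_shift (fun ch : Char => ch ≠ '1' ∧ ch ≠ '0')
      (fun _ => '0') l 0 le_rfl ((if c = '0' ∨ c = '1' then c else '0')) l
    simpa [pvSubNonBin] using this.trans (by rw [← pvLineA]; rw [ih]; simp [pvSubNonBin])

theorem reset_map_eq (map : List String) : reset_map map = reset_map_alt map := by
  induction map with
  | nil => simp [reset_map, reset_map_alt, PySem.List.enumerate_nil]
  | cons s rest ih =>
    unfold reset_map reset_map_alt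
    rw [PySem.List.enumerate_cons]
    simp only [List.foldl_cons, List.map_cons]
    have hstep : (s :: rest).set (0 : Int).toNat (String.ofList (pvLineA s.toList))
        = String.ofList (pvSubNonBin s.toList) :: rest := by
      simp [pvLineA_eq]
    rw [hstep]
    have := pv_foldl_set_shift (fun _ : String => True)
      (fun t => String.ofList (pvLineA t.toList)) rest 0 le_rfl
      (String.ofList (pvSubNonBin s.toList)) rest
    simp only [if_pos trivial] at this ⊢
    rw [this, ← reset_map, ih, reset_map_alt]

-- ===== VERDICT (by name: the statement is the Claim_ definition above) =====
theorem reset_map_spec : Claim_equal_reset_map := by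
  intro map _
  unfold Spec_reset_map
  exact reset_map_eq map
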